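-- pv_equiv track=rewrite | github.com/deeyajkotecha-del/helix-biotech | src/services/email_finder.py | rank_emails
-- ===== SOURCE A (Python) =====
-- from typing import Optional
--
-- def rank_emails(emails: list[str], first_name: str, last_name: str) -> Optional[str]:
--     """Rank emails by how well they match the person's name."""
--     if not emails:
--         return None
--
--     if not first_name and not last_name:
--         return None
--
--     first_name = first_name.lower()
--     last_name = last_name.lower()
--
--     scored = []
--     for email in emails:
--         local_part = email.split('@')[0].lower()
--         score = 0
--
--         contains_last = len(last_name) >= 3 and last_name in local_part
--         contains_first = len(first_name) >= 2 and first_name in local_part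
--         contains_first_initial = first_name and first_name[0] in local_part
--
--         # Must contain at least the last name
--         if not contains_last:
--             if not (contains_first_initial and len(last_name) >= 4 and last_name[:4] in local_part):
--                 scored.append({'email': email, 'score': -100})
--                 continue
--
--         # Score based on patterns
--         if local_part == f"{first_name}.{last_name}":
--             score += 50
--         if local_part == f"{first_name}{last_name}":
--             score += 45
--         if local_part == f"{last_name}.{first_name}":
--             score += 45
--         if first_name and local_part == f"{first_name[0]}.{last_name}":
--             score += 40
--         if first_name and local_part == f"{first_name[0]}{last_name}":
--             score += 35
--
--         # Partial matches
--         if contains_last and contains_first: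
--             score += 25
--         if contains_last and contains_first_initial:
--             score += 15
--         if contains_last:
--             score += 10
--
--         # Penalize generic emails
--         if any(x in local_part for x in ['info', 'contact', 'admin', 'support']):
--             score -= 50
--
--         scored.append({'email': email, 'score': score})
--
--     # Filter and sort
--     valid = [s for s in scored if s['score'] > 0]
--     if not valid:
--         return None
--
--     valid.sort(key=lambda x: x['score'], reverse=True)
--     return valid[0]['email']
-- ===== SOURCE B (Python) =====
-- from typing import Optional
--
--
-- def _score(local: str, first: str, last: str) -> int:
--     """Score one lowered local part against the lowered names (A's exact rules)."""
--     contains_last = len(last) >= 3 and last in local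
--     contains_first = len(first) >= 2 and first in local
--     contains_first_initial = bool(first) and first[0] in local
--
--     if not contains_last and not (
--         contains_first_initial and len(last) >= 4 and last[:4] in local
--     ):
--         return -100
--
--     checks = [
--         (local == f"{first}.{last}", 50),
--         (local == f"{first}{last}", 45),
--         (local == f"{last}.{first}", 45),
--         (bool(first) and local == f"{first[0]}.{last}", 40),
--         (bool(first) and local == f"{first[0]}{last}", 35),
--         (contains_last and contains_first, 25),
--         (contains_last and contains_first_initial, 15),
--         (contains_last, 10),
--         (any(x in local for x in ("info", "contact", "admin", "support")), -50),
--     ]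
--     return sum(pts for ok, pts in checks if ok)
--
--
-- def rank_emails(emails: list[str], first_name: str, last_name: str) -> Optional[str]:
--     """Rank emails by how well they match the person's name (single pass, no sort)."""
--     if not first_name and not last_name:
--         return None
--     first = first_name.lower()
--     last = last_name.lower()
--     best_email: Optional[str] = None
--     best_score = 0
--     for email in emails:
--         score = _score(email.split('@')[0].lower(), first, last)
--         if score > best_score:
--             best_email, best_score = email, score
--     return best_email
-- ===== Notes on version B (the rewrite author's own statement) =====
-- stated objective: simpler
-- what changed: Replaces A's build-a-scored-list / filter / stable-reverse-sort / take-first pipeline with a single pass that keeps a running best (strict > against best_score initialized to 0 preserves the positive-score filter and first-occurrence tie-breaking), and folds the per-email scoring over a table of (condition, points) pairs.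
import Mathlib
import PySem

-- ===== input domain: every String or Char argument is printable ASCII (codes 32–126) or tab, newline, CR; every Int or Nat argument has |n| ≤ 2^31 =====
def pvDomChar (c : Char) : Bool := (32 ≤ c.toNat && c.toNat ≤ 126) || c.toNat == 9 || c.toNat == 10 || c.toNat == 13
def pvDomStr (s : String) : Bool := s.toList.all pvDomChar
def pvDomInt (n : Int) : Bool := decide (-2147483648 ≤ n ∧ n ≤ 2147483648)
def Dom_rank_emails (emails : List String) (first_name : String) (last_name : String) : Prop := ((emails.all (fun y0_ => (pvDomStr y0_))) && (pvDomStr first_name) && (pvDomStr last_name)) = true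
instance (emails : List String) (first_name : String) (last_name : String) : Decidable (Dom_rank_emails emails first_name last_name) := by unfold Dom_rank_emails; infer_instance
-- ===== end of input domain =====

-- B replaces A's score-list / filter / stable-reverse-sort / take-first pipeline with a single
-- running-best pass (strict > against a best score starting at 0), same per-email scores: simpler, no sort.

-- ===== PORT A =====
def rank_emails (emails : List String) (first_name : String) (last_name : String) : Option String :=
  if emails = [] then none
  else if first_name = "" ∧ last_name = "" then none
  else
    let fn := PySem.Chars.lower first_name.toList
    let ln := PySem.Chars.lower last_name.toList
    let scored : List (String × Int) := emails.foldl (fun acc email =>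
      let lp := PySem.Chars.lower ((PySem.Chars.splitOn email.toList ['@']).headD [])
      let contains_last := decide (3 ≤ ln.length) && PySem.Chars.isIn ln lp
      let contains_first := decide (2 ≤ fn.length) && PySem.Chars.isIn fn lp
      let contains_first_initial := !decide (fn = []) && PySem.Chars.isIn (fn.take 1) lp
      if !contains_last && !(contains_first_initial && decide (4 ≤ ln.length) && PySem.Chars.isIn (ln.take 4) lp) then
        acc ++ [(email, (-100 : Int))]
      else
        let score : Int := 0
        let score := score + (if lp = fn ++ ['.'] ++ ln then 50 else 0)
        let score := score + (if lp = fn ++ ln then 45 else 0)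
        let score := score + (if lp = ln ++ ['.'] ++ fn then 45 else 0)
        let score := score + (if fn ≠ [] ∧ lp = fn.take 1 ++ ['.'] ++ ln then 40 else 0)
        let score := score + (if fn ≠ [] ∧ lp = fn.take 1 ++ ln then 35 else 0)
        let score := score + (if contains_last && contains_first then 25 else 0)
        let score := score + (if contains_last && contains_first_initial then 15 else 0)
        let score := score + (if contains_last then 10 else 0)
        let score := score - (if ["info", "contact", "admin", "support"].any (fun x => PySem.Chars.isIn x.toList lp) then 50 else 0)
        acc ++ [(email, score)]) []
    let valid := scored.filter (fun s => decide (0 < s.2))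
    if valid = [] then none
    else (PySem.List.sorted valid (fun x => x.2) true).head?.map (fun x => x.1)

-- ===== PORT B =====
-- port of Source B's _score (local part and the lowered names, A's exact per-email rules)
def scoreEmail (lp fn ln : List Char) : Int :=
  let contains_last := decide (3 ≤ ln.length) && PySem.Chars.isIn ln lp
  let contains_first := decide (2 ≤ fn.length) && PySem.Chars.isIn fn lp
  let contains_first_initial := !decide (fn = []) && PySem.Chars.isIn (fn.take 1) lp
  if !contains_last && !(contains_first_initial && decide (4 ≤ ln.length) && PySem.Chars.isIn (ln.take 4) lp) then
    -100
  else
    let checks : List (Bool × Int) := [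
      (decide (lp = fn ++ ['.'] ++ ln), 50),
      (decide (lp = fn ++ ln), 45),
      (decide (lp = ln ++ ['.'] ++ fn), 45),
      (!decide (fn = []) && decide (lp = fn.take 1 ++ ['.'] ++ ln), 40),
      (!decide (fn = []) && decide (lp = fn.take 1 ++ ln), 35),
      (contains_last && contains_first, 25),
      (contains_last && contains_first_initial, 15),
      (contains_last, 10),
      (["info", "contact", "admin", "support"].any (fun x => PySem.Chars.isIn x.toList lp), -50)]
    checks.foldl (fun s c => if c.1 then s + c.2 else s) 0

def rank_emails_alt (emails : List String) (first_name : String) (last_name : String) : Option String :=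
  if first_name = "" ∧ last_name = "" then none
  else
    let fn := PySem.Chars.lower first_name.toList
    let ln := PySem.Chars.lower last_name.toList
    (emails.foldl (fun best email =>
      let s := scoreEmail (PySem.Chars.lower ((PySem.Chars.splitOn email.toList ['@']).headD [])) fn ln
      if best.2 < s then (some email, s) else best) ((none : Option String), (0 : Int))).1

-- ===== PRECONDITION & SPEC =====
def Spec_rank_emails (emails : List String) (first_name : String) (last_name : String) (out : Option String) : Prop := out = rank_emails_alt emails first_name last_name
instance (emails : List String) (first_name : String) (last_name : String) (out : Option String) : Decidable (Spec_rank_emails emails first_name last_name out) := by unfold Spec_rank_emails; infer_instance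

-- ===== CLAIM (what is proved, stated in full; the proofs are below) =====
def Claim_equal_rank_emails : Prop := ∀ (emails : List String) (first_name : String) (last_name : String), Dom_rank_emails emails first_name last_name → Spec_rank_emails emails first_name last_name (rank_emails emails first_name last_name)

-- ===== LEMMAS AND PROOFS =====

-- the per-email pair both sides' loops are about
def scoreOf (fn ln : List Char) (email : String) : String × Int :=
  (email, scoreEmail (PySem.Chars.lower ((PySem.Chars.splitOn email.toList ['@']).headD [])) fn ln)

-- B's check-table fold equals A's chain of conditional additions
lemma step_add (s p : Int) (c : Prop) [Decidable c] : (if c then s + p else s) = s + (if c then p else 0) := by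
  split <;> simp

lemma chain_eq (Q1 Q2 Q3 Q4 Q5 : Prop) [Decidable Q1] [Decidable Q2] [Decidable Q3]
    [Decidable Q4] [Decidable Q5] (cl cf ci g : Bool) :
    List.foldl (fun (s : Int) (c : Bool × Int) => if c.1 then s + c.2 else s) 0
      [(decide Q1, 50), (decide Q2, 45), (decide Q3, 45), (decide Q4, 40), (decide Q5, 35),
       (cl && cf, 25), (cl && ci, 15), (cl, 10), (g, -50)]
    = 0 + (if Q1 then 50 else 0) + (if Q2 then 45 else 0) + (if Q3 then 45 else 0)
      + (if Q4 then 40 else 0) + (if Q5 then 35 else 0) + (if cl && cf then 25 else 0)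
      + (if cl && ci then 15 else 0) + (if cl then 10 else 0) - (if g then 50 else 0) := by
  have h9 : (if g = true then (-50 : Int) else 0) = -(if g = true then (50 : Int) else 0) := by
    split <;> norm_num
  simp only [List.foldl, step_add, decide_eq_true_eq]
  rw [h9, ← sub_eq_add_neg]

lemma and_decide_eq (fn : List Char) (P : Prop) [Decidable P] :
    (!decide (fn = []) && decide P) = decide (fn ≠ [] ∧ P) := by
  by_cases h : fn = [] <;> by_cases hP : P <;> simp [h, hP]

-- the score table of B equals A's chain of conditional additions
lemma score_eq (fn ln lp : List Char) (cl cf ci g : Bool) :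
    List.foldl (fun (s : Int) (c : Bool × Int) => if c.1 then s + c.2 else s) 0
      [(decide (lp = fn ++ ['.'] ++ ln), 50),
       (decide (lp = fn ++ ln), 45),
       (decide (lp = ln ++ ['.'] ++ fn), 45),
       (!decide (fn = []) && decide (lp = fn.take 1 ++ ['.'] ++ ln), 40),
       (!decide (fn = []) && decide (lp = fn.take 1 ++ ln), 35),
       (cl && cf, 25), (cl && ci, 15), (cl, 10), (g, -50)]
    = 0 + (if lp = fn ++ ['.'] ++ ln then 50 else 0)
      + (if lp = fn ++ ln then 45 else 0)
      + (if lp = ln ++ ['.'] ++ fn then 45 else 0)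
      + (if fn ≠ [] ∧ lp = fn.take 1 ++ ['.'] ++ ln then 40 else 0)
      + (if fn ≠ [] ∧ lp = fn.take 1 ++ ln then 35 else 0)
      + (if cl && cf then 25 else 0)
      + (if cl && ci then 15 else 0)
      + (if cl then 10 else 0)
      - (if g then 50 else 0) := by
  rw [and_decide_eq, and_decide_eq, chain_eq]

-- A's loop body appends exactly scoreOf
lemma abody_eq (fn ln : List Char) :
    (fun (acc : List (String × Int)) (email : String) =>
      let lp := PySem.Chars.lower ((PySem.Chars.splitOn email.toList ['@']).headD [])
      let contains_last := decide (3 ≤ ln.length) && PySem.Chars.isIn ln lp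
      let contains_first := decide (2 ≤ fn.length) && PySem.Chars.isIn fn lp
      let contains_first_initial := !decide (fn = []) && PySem.Chars.isIn (fn.take 1) lp
      if !contains_last && !(contains_first_initial && decide (4 ≤ ln.length) && PySem.Chars.isIn (ln.take 4) lp) then
        acc ++ [(email, (-100 : Int))]
      else
        let score : Int := 0
        let score := score + (if lp = fn ++ ['.'] ++ ln then 50 else 0)
        let score := score + (if lp = fn ++ ln then 45 else 0)
        let score := score + (if lp = ln ++ ['.'] ++ fn then 45 else 0)
        let score := score + (if fn ≠ [] ∧ lp = fn.take 1 ++ ['.'] ++ ln then 40 else 0)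
        let score := score + (if fn ≠ [] ∧ lp = fn.take 1 ++ ln then 35 else 0)
        let score := score + (if contains_last && contains_first then 25 else 0)
        let score := score + (if contains_last && contains_first_initial then 15 else 0)
        let score := score + (if contains_last then 10 else 0)
        let score := score - (if ["info", "contact", "admin", "support"].any (fun x => PySem.Chars.isIn x.toList lp) then 50 else 0)
        acc ++ [(email, score)])
    = (fun acc email => acc ++ [scoreOf fn ln email]) := by
  funext acc email
  simp only [scoreOf, scoreEmail]
  by_cases hG : (!(decide (3 ≤ ln.length) && PySem.Chars.isIn ln (PySem.Chars.lower ((PySem.Chars.splitOn email.toList ['@']).headD []))) &&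
      !((!decide (fn = []) && PySem.Chars.isIn (List.take 1 fn) (PySem.Chars.lower ((PySem.Chars.splitOn email.toList ['@']).headD []))) &&
        decide (4 ≤ ln.length) &&
        PySem.Chars.isIn (List.take 4 ln) (PySem.Chars.lower ((PySem.Chars.splitOn email.toList ['@']).headD [])))) = true
  · rw [if_pos hG, if_pos hG]
  · rw [if_neg hG, if_neg hG, score_eq]

-- the running strict-max fold (first maximal element)
def mstep (acc : Option (String × Int)) (x : String × Int) : Option (String × Int) :=
  match acc with
  | none => some x
  | some m => if m.2 < x.2 then some x else some m

def mfold (ys : List (String × Int)) (o : Option (String × Int)) : Option (String × Int) :=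
  ys.foldl mstep o

-- head of a reverse insertion-sort step is the running strict max
lemma insertBy_head (x : String × Int) (acc : List (String × Int)) :
    (PySem.List.insertBy (fun a b => decide (b.2 < a.2)) x acc).head? = mstep acc.head? x := by
  cases acc with
  | nil => rfl
  | cons y ys =>
    simp only [PySem.List.insertBy, List.head?, mstep]
    split_ifs with h <;> simp_all

lemma foldl_insertBy_head (xs : List (String × Int)) (acc : List (String × Int)) :
    (xs.foldl (fun acc x => PySem.List.insertBy (fun a b => decide (b.2 < a.2)) x acc) acc).head? =
      xs.foldl mstep acc.head? := by
  induction xs generalizing acc with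
  | nil => rfl
  | cons x xs ih =>
    simp only [List.foldl]
    rw [ih, insertBy_head]

-- head of Python's stable reverse sort = first element of maximal key
lemma head_sorted_rev_eq_mfold (ys : List (String × Int)) :
    (PySem.List.sorted ys (fun x => x.2) true).head? = mfold ys none := by
  rw [PySem.List.sorted_rev_eq_foldl_insertBy, foldl_insertBy_head]
  rfl

-- encode B's running state as an optional (email, score) pair
def encB : Option (String × Int) → Option String × Int
  | none => (none, 0)
  | some p => (some p.1, p.2)

-- B's running-best fold over pairs = first strict max of the positive-score filter
lemma bfold_eq (ys : List (String × Int)) (o : Option (String × Int))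
    (h : ∀ p ∈ o, 0 < p.2) :
    ys.foldl (fun best p => if best.2 < p.2 then (some p.1, p.2) else best) (encB o) =
      encB (mfold (ys.filter (fun s => decide (0 < s.2))) o) := by
  induction ys generalizing o with
  | nil => rfl
  | cons p ys ih =>
    by_cases hp : 0 < p.2
    · have hfilter : (p :: ys).filter (fun s => decide (0 < s.2)) =
        p :: ys.filter (fun s => decide (0 < s.2)) := by simp [List.filter, hp]
      rw [hfilter]
      cases o with
      | none =>
        show List.foldl _ (if (0 : Int) < p.2 then (some p.1, p.2) else ((none : Option String), (0 : Int))) ys = _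
        rw [if_pos hp]
        exact ih (some p) (by simpa using hp)
      | some m =>
        have hm : 0 < m.2 := h m rfl
        show List.foldl _ (if m.2 < p.2 then (some p.1, p.2) else (some m.1, m.2)) ys =
          encB (mfold (ys.filter (fun s => decide (0 < s.2))) (if m.2 < p.2 then some p else some m))
        by_cases hlt : m.2 < p.2
        · rw [if_pos hlt, if_pos hlt]
          exact ih (some p) (by simpa using hp)
        · rw [if_neg hlt, if_neg hlt]
          exact ih (some m) (by simpa using hm)
    · have hfilter : (p :: ys).filter (fun s => decide (0 < s.2)) =
        ys.filter (fun s => decide (0 < s.2)) := by simp [List.filter, hp]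
      rw [hfilter]
      cases o with
      | none =>
        show List.foldl _ (if (0 : Int) < p.2 then (some p.1, p.2) else ((none : Option String), (0 : Int))) ys = _
        rw [if_neg hp]
        exact ih none h
      | some m =>
        have hm : 0 < m.2 := h m rfl
        have hlt : ¬ m.2 < p.2 := by omega
        show List.foldl _ (if m.2 < p.2 then (some p.1, p.2) else (some m.1, m.2)) ys = _
        rw [if_neg hlt]
        exact ih (some m) h

lemma encB_fst (o : Option (String × Int)) : (encB o).1 = o.map (fun p => p.1) := by
  cases o <;> rfl

-- A's tail (filter, sort, take head) equals the first strict max of the filter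
lemma atail_eq (ys : List (String × Int)) :
    (if ys.filter (fun s => decide (0 < s.2)) = [] then none
     else (PySem.List.sorted (ys.filter (fun s => decide (0 < s.2))) (fun x => x.2) true).head?.map (fun x => x.1))
    = (mfold (ys.filter (fun s => decide (0 < s.2))) none).map (fun p => p.1) := by
  by_cases h : ys.filter (fun s => decide (0 < s.2)) = []
  · rw [if_pos h, h]
    rfl
  · rw [if_neg h, head_sorted_rev_eq_mfold]

-- ===== VERDICT (by name: the statement is the Claim_ definition above) =====
theorem rank_emails_spec : Claim_equal_rank_emails := by
  intro emails first_name last_name _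
  unfold Spec_rank_emails
  simp only [rank_emails, rank_emails_alt]
  by_cases hname : first_name = "" ∧ last_name = ""
  · simp only [if_pos hname]
    split <;> rfl
  · rw [if_neg hname]
    by_cases hemails : emails = []
    · subst hemails
      rw [if_pos rfl, if_neg hname]
      rfl
    · rw [if_neg hemails, if_neg hname]
      rw [abody_eq, PySem.List.foldl_append_singleton_eq_map]
      rw [List.nil_append]
      have hB : emails.foldl (fun (best : Option String × Int) email =>
          let s := scoreEmail (PySem.Chars.lower ((PySem.Chars.splitOn email.toList ['@']).headD []))
            (PySem.Chars.lower first_name.toList) (PySem.Chars.lower last_name.toList)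
          if best.2 < s then (some email, s) else best) ((none : Option String), (0 : Int)) =
          (emails.map (scoreOf (PySem.Chars.lower first_name.toList) (PySem.Chars.lower last_name.toList))).foldl
            (fun best p => if best.2 < p.2 then (some p.1, p.2) else best) ((none : Option String), (0 : Int)) := by
        rw [List.foldl_map]
        rfl
      rw [hB]
      have hb := bfold_eq (emails.map (scoreOf (PySem.Chars.lower first_name.toList) (PySem.Chars.lower last_name.toList))) none (by simp)
      rw [show encB none = ((none : Option String), (0 : Int)) from rfl] at hb
      rw [hb, encB_fst]
      exact atail_eq _
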